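-- pv_equiv track=rewrite | github.com/Retkoj/AOC-2021 | src/day_6.py | procreate
-- ===== SOURCE A (Python) =====
-- import copy
--
-- def procreate(fish_list):
--     tmp_list = copy.deepcopy(fish_list)
--     for i, fish in enumerate(fish_list):
--         if fish == 0:
--             tmp_list[i] = 6
--             tmp_list.append(8)
--         elif fish > 0:
--             tmp_list[i] = fish - 1
--     return tmp_list
-- ===== SOURCE B (Python) =====
-- def procreate(fish_list):
--     aged, news = _solve(fish_list)
--     return aged + news
--
--
-- def _solve(xs):
--     """Divide and conquer: return (aged timers of xs, newborn 8s spawned by xs)."""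
--     if len(xs) == 0:
--         return [], []
--     if len(xs) == 1:
--         f = xs[0]
--         if f == 0:
--             return [6], [8]
--         if f > 0:
--             return [f - 1], []
--         return [f], []
--     mid = len(xs) // 2
--     a1, n1 = _solve(xs[:mid])
--     a2, n2 = _solve(xs[mid:])
--     return a1 + a2, n1 + n2
-- ===== Notes on version B (the rewrite author's own statement) =====
-- stated objective: alternative
-- what changed: Replaces A's deepcopy plus interleaved index-assignment/append loop with a divide-and-conquer recursion that splits the list in half, returns (aged, newborns) pairs for each half and concatenates them; no copying or mutation of the input.
import Mathlib
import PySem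

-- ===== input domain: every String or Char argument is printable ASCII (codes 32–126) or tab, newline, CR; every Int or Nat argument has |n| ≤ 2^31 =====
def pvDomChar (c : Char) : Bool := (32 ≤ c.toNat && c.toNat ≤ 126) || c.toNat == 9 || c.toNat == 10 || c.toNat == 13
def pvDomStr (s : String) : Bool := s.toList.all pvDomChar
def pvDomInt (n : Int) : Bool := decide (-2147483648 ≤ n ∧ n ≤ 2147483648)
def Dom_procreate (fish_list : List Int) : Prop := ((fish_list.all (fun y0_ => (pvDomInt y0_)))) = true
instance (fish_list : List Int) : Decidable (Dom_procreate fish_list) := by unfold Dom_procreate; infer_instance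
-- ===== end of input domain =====

-- B replaces A's copy-and-mutate loop by a divide-and-conquer recursion returning (aged, newborn) pairs; equal return values (A does not mutate its argument).

-- ===== PORT A =====
-- one loop iteration of A: set index i, possibly append a newborn 8
def procreateStep (tmp : List Int) (p : Int × Int) : List Int :=
  if p.2 = 0 then (PySem.List.pySetD tmp p.1 6) ++ [8]
  else if p.2 > 0 then PySem.List.pySetD tmp p.1 (p.2 - 1)
  else tmp

def procreate (fish_list : List Int) : List Int :=
  (PySem.List.enumerate fish_list 0).foldl procreateStep fish_list

-- ===== PORT B =====
-- _solve of Source B: the slices xs[:mid], xs[mid:] are xs.take mid / xs.drop mid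
-- (PySem.List.slice_to_natCast / slice_from_natCast, mid a natural number);
-- xs[0] on the guarded length-1 list is xs.headI.
def pvSolve (xs : List Int) : List Int × List Int :=
  if _h0 : xs.length = 0 then ([], [])
  else if h1 : xs.length = 1 then
    let f := xs.headI
    if f = 0 then ([6], [8]) else if f > 0 then ([f - 1], []) else ([f], [])
  else
    let mid := xs.length / 2
    let p1 := pvSolve (xs.take mid)
    let p2 := pvSolve (xs.drop mid)
    (p1.1 ++ p2.1, p1.2 ++ p2.2)
termination_by xs.length
decreasing_by
  · simp only [List.length_take]; omega
  · simp only [List.length_drop]; omega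

def procreate_alt (fish_list : List Int) : List Int :=
  (pvSolve fish_list).1 ++ (pvSolve fish_list).2

-- ===== PRECONDITION & SPEC =====
def Spec_procreate (fish_list : List Int) (out : List Int) : Prop := out = procreate_alt fish_list
instance (fish_list : List Int) (out : List Int) : Decidable (Spec_procreate fish_list out) := by unfold Spec_procreate; infer_instance

-- ===== CLAIM (what is proved, stated in full; the proofs are below) =====
def Claim_equal_procreate : Prop := ∀ (fish_list : List Int), Dom_procreate fish_list → Spec_procreate fish_list (procreate fish_list)

-- ===== LEMMAS AND PROOFS =====

def pvAge (f : Int) : Int := if f = 0 then 6 else if f > 0 then f - 1 else f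

theorem pv_set_append (pre : List Int) (x v : Int) (t : List Int) :
    (pre ++ x :: t).set pre.length v = pre ++ v :: t := by
  induction pre with
  | nil => simp
  | cons a pre ih => simp [ih]

theorem pv_loop (xs : List Int) : ∀ (pre es : List Int),
    (PySem.List.enumerate xs (pre.length : Int)).foldl procreateStep (pre ++ xs ++ es)
      = pre ++ xs.map pvAge ++ es ++ List.replicate (List.count 0 xs) 8 := by
  induction xs with
  | nil => intro pre es; simp [PySem.List.enumerate_nil]
  | cons x xs ih =>
    intro pre es
    rw [PySem.List.enumerate_cons, List.foldl_cons]
    have hset : procreateStep (pre ++ (x :: xs) ++ es) ((pre.length : Int), x)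
        = (pre ++ [pvAge x]) ++ xs ++ (if x = 0 then es ++ [8] else es) := by
      unfold procreateStep pvAge
      have h : pre ++ (x :: xs) ++ es = pre ++ x :: (xs ++ es) := by simp
      split_ifs with h0 hp
      · simp only [h, PySem.List.pySetD_natCast, pv_set_append]; simp
      · simp only [h, PySem.List.pySetD_natCast, pv_set_append]; simp
      · simp [h]
    rw [hset]
    have hlen : ((pre.length : Int) + 1) = (((pre ++ [pvAge x]).length : Nat) : Int) := by
      simp
    rw [hlen, ih (pre ++ [pvAge x]) (if x = 0 then es ++ [8] else es)]
    by_cases h0 : x = 0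
    · simp [h0, List.replicate_succ]
    · simp [h0]

theorem pvSolve_eq (xs : List Int) :
    pvSolve xs = (xs.map pvAge, List.replicate (List.count 0 xs) 8) := by
  fun_induction pvSolve xs with
  | case1 xs h0 =>
    rw [List.length_eq_zero_iff] at h0; subst h0; simp
  | case2 xs h0 h1 f hf =>
    obtain ⟨x, rfl⟩ := List.length_eq_one_iff.mp h1
    simp only [f, List.headI] at hf
    simp [pvAge, hf]
  | case3 xs h0 h1 f hf hp =>
    obtain ⟨x, rfl⟩ := List.length_eq_one_iff.mp h1
    simp only [f, List.headI] at hf hp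
    simp [f, pvAge, hf, hp]
  | case4 xs h0 h1 f hf hp =>
    obtain ⟨x, rfl⟩ := List.length_eq_one_iff.mp h1
    simp only [f, List.headI] at hf hp
    simp [f, pvAge, hf, hp]
  | case5 xs h0 h1 mid p1 p2 ih2 ih1 =>
    have hsplit : xs.take mid ++ xs.drop mid = xs := List.take_append_drop mid xs
    simp only [p1, p2, ih1, ih2, Prod.mk.injEq]
    constructor
    · rw [← List.map_append, hsplit]
    · rw [← List.replicate_add, ← List.count_append, hsplit]

theorem procreate_eq_alt (fish_list : List Int) :
    procreate fish_list = procreate_alt fish_list := by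
  have h := pv_loop fish_list [] []
  norm_num at h
  unfold procreate procreate_alt
  rw [h, pvSolve_eq]

-- ===== VERDICT (by name: the statement is the Claim_ definition above) =====
theorem procreate_spec : Claim_equal_procreate := by
  intro fish_list _
  unfold Spec_procreate
  exact procreate_eq_alt fish_list
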